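-- pv_equiv track=rewrite | github.com/teikoyo/recsys | src/content/acquisition.py | match_slug_to_ref
-- ===== SOURCE A (Python) =====
-- from typing import Any, Dict, List, Optional, Set, Tuple
--
-- def match_slug_to_ref(
--     slug: str,
--     title: str,
--     api_results: List[Dict[str, Any]],
-- ) -> Tuple[Optional[str], str]:
--     """Match a local slug to a Kaggle API ref.
--
--     Priority: exact suffix match on ref, then fuzzy title match.
--
--     Args:
--         slug: Local dataset slug.
--         title: Dataset title string.
--         api_results: Results from :func:`search_kaggle_slug`.
--
--     Returns:
--         ``(ref, confidence)`` where confidence is ``"exact"`` | ``"fuzzy"`` | ``"none"``.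
--     """
--     if not api_results:
--         return None, "none"
--
--     slug_lower = slug.lower().strip()
--
--     # 1. Exact suffix match
--     for item in api_results:
--         ref = str(item.get("ref", "")).lower().strip()
--         if ref.endswith(f"/{slug_lower}"):
--             return item["ref"], "exact"
--
--     # 2. Fuzzy title match
--     if title and isinstance(title, str):
--         title_lower = title.lower().strip()
--         for item in api_results:
--             api_title = str(item.get("title", "")).lower().strip()
--             if (title_lower == api_title
--                     or title_lower in api_title
--                     or api_title in title_lower):
--                 return item["ref"], "fuzzy"
--
--     return None, "none"
-- ===== SOURCE B (Python) =====
-- def match_slug_to_ref(slug, title, api_results):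
--     """Single scoring pass: return immediately on an exact suffix match, remember
--     the first fuzzy-titled item, and resolve the fuzzy/none verdict after the loop."""
--     target = "/" + slug.lower().strip()
--     tl = title.lower().strip() if title and isinstance(title, str) else None
--     best = None
--     for item in api_results:
--         if str(item.get("ref", "")).lower().strip().endswith(target):
--             return item["ref"], "exact"
--         if tl is not None and best is None:
--             api_title = str(item.get("title", "")).lower().strip()
--             if tl == api_title or tl in api_title or api_title in tl:
--                 best = item
--     if best is not None:
--         return best["ref"], "fuzzy"
--     return None, "none"
-- ===== Notes on version B (the rewrite author's own statement) =====
-- stated objective: alternative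
-- what changed: A's two sequential scans (exact pass over the whole list, then a separate fuzzy pass) become one pass that returns at once on an exact match and remembers the first fuzzy-matching item, resolving the fuzzy/none verdict after the loop.
-- outside the precondition, e.g. on match_slug_to_ref('cats', 'cat', [{'title': 'cat'}]): A raises KeyError, B raises KeyError
import Mathlib
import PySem

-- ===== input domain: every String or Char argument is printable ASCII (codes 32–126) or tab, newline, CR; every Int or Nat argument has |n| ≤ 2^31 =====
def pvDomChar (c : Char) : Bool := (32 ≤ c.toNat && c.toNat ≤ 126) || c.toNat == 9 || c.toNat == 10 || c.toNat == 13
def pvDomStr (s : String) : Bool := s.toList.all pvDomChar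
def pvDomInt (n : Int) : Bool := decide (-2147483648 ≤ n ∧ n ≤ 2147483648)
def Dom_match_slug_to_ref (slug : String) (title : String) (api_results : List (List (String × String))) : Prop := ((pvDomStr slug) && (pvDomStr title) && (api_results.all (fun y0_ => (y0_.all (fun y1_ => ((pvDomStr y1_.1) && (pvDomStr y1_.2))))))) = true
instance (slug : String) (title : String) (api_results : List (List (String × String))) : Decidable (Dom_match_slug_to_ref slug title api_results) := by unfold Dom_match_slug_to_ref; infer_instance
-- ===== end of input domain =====

-- B replaces A's two sequential scans by one scoring pass (exact returns at once,
-- the first fuzzy item is remembered and resolved after the loop); objective: alternative decomposition, same cost.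

-- ===== PORT A =====
-- shared item-level predicates: the literal condition lines of the Python sources
-- str(item.get("ref", "")).lower().strip().endswith("/" + slug_lower)
def pvExactP (sl : List Char) (item : List (String × String)) : Bool :=
  PySem.Chars.endswith (PySem.Chars.strip (PySem.Chars.lower
    (((PySem.Dict.mk item).get? "ref").getD "").toList)) ('/' :: sl)

-- title_lower == api_title or title_lower in api_title or api_title in title_lower
def pvFuzzyP (tl : List Char) (item : List (String × String)) : Bool :=
  let api_title := PySem.Chars.strip (PySem.Chars.lower
    (((PySem.Dict.mk item).get? "title").getD "").toList)
  tl == api_title || PySem.Chars.isIn tl api_title || PySem.Chars.isIn api_title tl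

-- 'return item["ref"], tag' — Python raises KeyError when "ref" is absent (excluded by Pre_);
-- both ports totalise that raise point with the same (none, "none") placeholder.
def pvRefRet (item : List (String × String)) (tag : String) : Option String × String :=
  match (PySem.Dict.mk item).get? "ref" with
  | some r => (some r, tag)
  | none => (none, "none")

-- A's first loop: first exact suffix match
def pvALoop1 (sl : List Char) : List (List (String × String)) → Option (Option String × String)
  | [] => none
  | item :: rest => if pvExactP sl item then some (pvRefRet item "exact") else pvALoop1 sl rest

-- A's second loop: first fuzzy title match
def pvALoop2 (tl : List Char) : List (List (String × String)) → Option (Option String × String)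
  | [] => none
  | item :: rest => if pvFuzzyP tl item then some (pvRefRet item "fuzzy") else pvALoop2 tl rest

def match_slug_to_ref (slug : String) (title : String) (api_results : List (List (String × String))) : Option String × String :=
  if api_results.isEmpty then (none, "none")
  else
    let sl := PySem.Chars.strip (PySem.Chars.lower slug.toList)
    match pvALoop1 sl api_results with
    | some r => r
    | none =>
      if title = "" then (none, "none")
      else
        let tl := PySem.Chars.strip (PySem.Chars.lower title.toList)
        match pvALoop2 tl api_results with
        | some r => r
        | none => (none, "none")

-- ===== PORT B =====
-- B's single pass: return on exact; remember the first fuzzy item in `best`; settle after the loop.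
def pvBLoop (sl : List Char) (tl? : Option (List Char)) (best : Option (List (String × String))) :
    List (List (String × String)) → Option String × String
  | [] =>
    match best with
    | some it => pvRefRet it "fuzzy"
    | none => (none, "none")
  | item :: rest =>
    if pvExactP sl item then pvRefRet item "exact"
    else
      let best' :=
        match tl?, best with
        | some tl, none => if pvFuzzyP tl item then some item else none
        | _, _ => best
      pvBLoop sl tl? best' rest

def match_slug_to_ref_alt (slug : String) (title : String) (api_results : List (List (String × String))) : Option String × String :=
  let sl := PySem.Chars.strip (PySem.Chars.lower slug.toList)
  let tl? := if title = "" then none else some (PySem.Chars.strip (PySem.Chars.lower title.toList))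
  pvBLoop sl tl? none api_results

-- ===== PRECONDITION & SPEC =====
-- Pre_ excludes exactly the inputs on which Python A raises KeyError: no item is an exact match,
-- the title is non-empty, and the first fuzzy-matching item has no "ref" key (A does item["ref"] there).
def Pre_match_slug_to_ref (slug : String) (title : String) (api_results : List (List (String × String))) : Prop :=
  (api_results.any (pvExactP (PySem.Chars.strip (PySem.Chars.lower slug.toList)))
    || (title == "")
    || (match api_results.find? (pvFuzzyP (PySem.Chars.strip (PySem.Chars.lower title.toList))) with
        | some it => ((PySem.Dict.mk it).get? "ref").isSome
        | none => true)) = true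
instance (slug : String) (title : String) (api_results : List (List (String × String))) : Decidable (Pre_match_slug_to_ref slug title api_results) := by unfold Pre_match_slug_to_ref; infer_instance

def pvWitness_match_slug_to_ref : String × String × (List (List (String × String))) :=
  ("cats", "Cat Data", [[("ref", "u/dogs"), ("title", "dogs")], [("ref", "u/cats"), ("title", "cat data")]])

def Spec_match_slug_to_ref (slug : String) (title : String) (api_results : List (List (String × String))) (out : Option String × String) : Prop := out = match_slug_to_ref_alt slug title api_results
instance (slug : String) (title : String) (api_results : List (List (String × String))) (out : Option String × String) : Decidable (Spec_match_slug_to_ref slug title api_results out) := by unfold Spec_match_slug_to_ref; infer_instance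

-- ===== CLAIM (what is proved, stated in full; the proofs are below) =====
def Claim_equal_match_slug_to_ref : Prop := ∀ (slug : String) (title : String) (api_results : List (List (String × String))), Dom_match_slug_to_ref slug title api_results → Pre_match_slug_to_ref slug title api_results → Spec_match_slug_to_ref slug title api_results (match_slug_to_ref slug title api_results)

-- ===== LEMMAS AND PROOFS =====
-- Loop correspondence: B's single pass equals A's exact scan, falling back to the pending
-- `best` item, and only then to A's fuzzy scan. Holds for every input (the ports agree on
-- the common totalisation of the raise point), so the proof does not need Pre_;
-- Pre_ is there because Python A raises outside it.
theorem pvBLoop_eq (sl : List Char) (tl? : Option (List Char)) :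
    ∀ (l : List (List (String × String))) (best : Option (List (String × String))),
    pvBLoop sl tl? best l =
      match pvALoop1 sl l with
      | some r => r
      | none =>
        match best with
        | some it => pvRefRet it "fuzzy"
        | none =>
          match tl? with
          | some tl =>
            (match pvALoop2 tl l with
             | some r => r
             | none => (none, "none"))
          | none => (none, "none")
  | [], best => by
    cases best <;> cases tl? <;> simp [pvBLoop, pvALoop1, pvALoop2]
  | item :: rest, best => by
    by_cases he : pvExactP sl item = true
    · simp [pvBLoop, pvALoop1, he]
    · cases best with
      | some it =>
        have h := pvBLoop_eq sl tl? rest (some it)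
        cases tl? <;> simp [pvBLoop, pvALoop1, he, h]
      | none =>
        cases tl? with
        | none =>
          have h := pvBLoop_eq sl none rest none
          simp [pvBLoop, pvALoop1, he, h]
        | some tl =>
          by_cases hf : pvFuzzyP tl item = true
          · have h := pvBLoop_eq sl (some tl) rest (some item)
            simp [pvBLoop, pvALoop1, pvALoop2, he, hf, h]
          · have h := pvBLoop_eq sl (some tl) rest none
            simp [pvBLoop, pvALoop1, pvALoop2, he, hf, h]

-- ===== VERDICT (by name: the statement is the Claim_ definition above) =====
theorem match_slug_to_ref_spec : Claim_equal_match_slug_to_ref := by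
  intro slug title api_results _ _
  unfold Spec_match_slug_to_ref match_slug_to_ref match_slug_to_ref_alt
  rw [pvBLoop_eq]
  cases api_results with
  | nil => by_cases ht : title = "" <;> simp [ht, pvALoop1, pvALoop2]
  | cons item rest =>
    simp only [List.isEmpty_cons, if_neg Bool.false_ne_true]
    by_cases ht : title = "" <;> simp [ht]
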